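-- pv_equiv track=rewrite | github.com/ramzialsabarna/Medicare-internal-audit-sysytem | python/validation_code/uvl_to_figure_batch.py | parse_uvl_features_tree
-- ===== SOURCE A (Python) =====
-- def indent_level(line: str) -> int:
--     return (len(line) - len(line.lstrip(" "))) // 4
--
-- def clean_feat_name(s: str) -> str:
--     s = s.strip()
--     return s.replace("{abstract}", "").strip()
--
-- def parse_uvl_features_tree(uvl_text: str):
--     """
--     Parse ONLY the 'features' section of UVL into parent-child edges based on indentation.
--     Skips group keywords: mandatory/optional/alternative/or.
--     """
--     lines = uvl_text.splitlines()
--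
--     try:
--         i0 = next(i for i, l in enumerate(lines) if l.strip().lower() == "features")
--     except StopIteration:
--         return [], None
--
--     edges = []
--     stack = []  # list[(level, feature)]
--
--     root = None
--
--     for line in lines[i0 + 1 :]:
--         if line.strip().lower() == "constraints":
--             break
--         if not line.strip():
--             continue
--
--         lvl = indent_level(line)
--         token = line.strip()
--
--         if token in ("mandatory", "optional", "alternative", "or"):
--             continue
--
--         feat = clean_feat_name(token)
--         if not feat:
--             continue
--
--         if root is None:
--             root = feat
--
--         while stack and stack[-1][0] >= lvl:
--             stack.pop()
--
--         if stack:
--             parent = stack[-1][1]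
--             edges.append((parent, feat))
--
--         stack.append((lvl, feat))
--
--     return edges, root
-- ===== SOURCE B (Python) =====
-- def indent_level(line: str) -> int:
--     return (len(line) - len(line.lstrip(" "))) // 4
--
-- def clean_feat_name(s: str) -> str:
--     s = s.strip()
--     return s.replace("{abstract}", "").strip()
--
-- _KEYWORDS = ("mandatory", "optional", "alternative", "or")
--
-- def parse_uvl_features_tree(uvl_text: str):
--     """Same result as the stack version, but in two passes: first collect the
--     filtered (level, feature) list, then find each feature's parent by scanning
--     backwards for the previous entry with a strictly smaller level."""
--     lines = uvl_text.splitlines()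
--     for i0, l in enumerate(lines):
--         if l.strip().lower() == "features":
--             break
--     else:
--         return [], None
--
--     items = []
--     for line in lines[i0 + 1:]:
--         token = line.strip()
--         if token.lower() == "constraints":
--             break
--         if not token:
--             continue
--         if token in _KEYWORDS:
--             continue
--         feat = clean_feat_name(token)
--         if feat:
--             items.append((indent_level(line), feat))
--
--     root = items[0][1] if items else None
--     edges = []
--     for i, (lvl, feat) in enumerate(items):
--         for j in range(i - 1, -1, -1):
--             if items[j][0] < lvl:
--                 edges.append((items[j][1], feat))
--                 break
--     return edges, root
-- ===== Notes on version B (the rewrite author's own statement) =====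
-- stated objective: alternative
-- what changed: Replaces the single interleaved monotonic-stack pass with two passes: first collect the filtered (level, feature) list, then find each feature's parent by a backward previous-smaller-level scan, with no stack maintained.
import Mathlib
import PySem

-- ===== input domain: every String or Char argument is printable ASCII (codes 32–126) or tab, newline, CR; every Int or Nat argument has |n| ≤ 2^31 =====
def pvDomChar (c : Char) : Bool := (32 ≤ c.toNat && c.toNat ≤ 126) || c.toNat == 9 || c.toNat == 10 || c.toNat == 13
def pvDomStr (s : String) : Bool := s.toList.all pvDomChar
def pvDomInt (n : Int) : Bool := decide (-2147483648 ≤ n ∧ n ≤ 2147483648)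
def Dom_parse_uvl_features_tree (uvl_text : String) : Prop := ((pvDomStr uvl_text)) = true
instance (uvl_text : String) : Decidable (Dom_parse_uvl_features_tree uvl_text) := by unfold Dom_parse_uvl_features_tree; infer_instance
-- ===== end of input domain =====

-- B replaces A's interleaved monotonic-stack pass by a collect-then-backward-scan
-- (previous-smaller-level) decomposition; same result, no stack (objective: alternative).

-- ===== PORT A =====
-- shared module helpers (indent_level / clean_feat_name / the 'features' line search);
-- lstrip(" ") is ported by hand as dropWhile (· == ' '), which is exact for that call
def pvIndent (line : String) : Int :=
  PySem.Int.floordiv ((line.toList.length : Int) - ((line.toList.dropWhile (fun c => c == ' ')).length : Int)) 4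

def pvClean (s : String) : String :=
  PySem.Str.strip (PySem.Str.replace (PySem.Str.strip s) "{abstract}" "")

def pvAfterFeatures : List String → Option (List String)
  | [] => none
  | l :: rest =>
    if PySem.Str.lower (PySem.Str.strip l) = "features" then some rest else pvAfterFeatures rest

def pvIsKeyword (token : String) : Bool :=
  token == "mandatory" || token == "optional" || token == "alternative" || token == "or"

-- A's for-loop with break; the Python stack (append/pop at the end) is held top-first,
-- so 'while stack and stack[-1][0] >= lvl: pop' is dropWhile on the head
def pvLoopA : List String → List (String × String) → List (Int × String) → Option String →
    (List (String × String)) × Option String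
  | [], edges, _, root => (edges, root)
  | line :: rest, edges, stack, root =>
    if PySem.Str.lower (PySem.Str.strip line) = "constraints" then (edges, root)
    else if PySem.Str.strip line = "" then pvLoopA rest edges stack root
    else
      let lvl := pvIndent line
      let token := PySem.Str.strip line
      if pvIsKeyword token then pvLoopA rest edges stack root
      else
        let feat := pvClean token
        if feat = "" then pvLoopA rest edges stack root
        else
          let root' := if root.isNone then some feat else root
          let stack' := stack.dropWhile (fun p => decide (lvl ≤ p.1))
          let edges' := match stack'.head? with
            | some p => edges ++ [(p.2, feat)]
            | none => edges
          pvLoopA rest edges' ((lvl, feat) :: stack') root'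

def parse_uvl_features_tree (uvl_text : String) : (List (String × String)) × Option String :=
  match pvAfterFeatures (PySem.Str.splitlines uvl_text) with
  | none => ([], none)
  | some rest => pvLoopA rest [] [] none

-- ===== PORT B =====
-- pass 1: the filtered (level, feature) list in document order
def pvCollect : List String → List (Int × String)
  | [] => []
  | line :: rest =>
    let token := PySem.Str.strip line
    if PySem.Str.lower token = "constraints" then []
    else if token = "" then pvCollect rest
    else if pvIsKeyword token then pvCollect rest
    else
      let feat := pvClean token
      if feat = "" then pvCollect rest
      else (pvIndent line, feat) :: pvCollect rest

-- pass 2: parent of each feature = first previous entry (scanning backwards,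
-- i.e. find? over the reversed prefix) with strictly smaller level
def pvEdgesB : List (Int × String) → List (Int × String) → List (String × String)
  | _, [] => []
  | prevRev, (lvl, feat) :: rest =>
    (match prevRev.find? (fun p => decide (p.1 < lvl)) with
     | some p => [(p.2, feat)]
     | none => []) ++ pvEdgesB ((lvl, feat) :: prevRev) rest

def parse_uvl_features_tree_alt (uvl_text : String) : (List (String × String)) × Option String :=
  match pvAfterFeatures (PySem.Str.splitlines uvl_text) with
  | none => ([], none)
  | some rest =>
    let items := pvCollect rest
    (pvEdgesB [] items, items.head?.map (·.2))

-- ===== PRECONDITION & SPEC =====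
def Spec_parse_uvl_features_tree (uvl_text : String) (out : (List (String × String)) × Option String) : Prop := out = parse_uvl_features_tree_alt uvl_text
instance (uvl_text : String) (out : (List (String × String)) × Option String) : Decidable (Spec_parse_uvl_features_tree uvl_text out) := by unfold Spec_parse_uvl_features_tree; infer_instance

-- ===== CLAIM (what is proved, stated in full; the proofs are below) =====
def Claim_equal_parse_uvl_features_tree : Prop := ∀ (uvl_text : String), Dom_parse_uvl_features_tree uvl_text → Spec_parse_uvl_features_tree uvl_text (parse_uvl_features_tree uvl_text)

-- ===== LEMMAS AND PROOFS =====

-- the stack machine over the already-filtered items (proof-side abstraction of A's loop)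
def pvRun : List (Int × String) → List (String × String) → List (Int × String) → Option String →
    (List (String × String)) × Option String
  | [], edges, _, root => (edges, root)
  | (lvl, feat) :: rest, edges, stack, root =>
    let root' := if root.isNone then some feat else root
    let stack' := stack.dropWhile (fun p => decide (lvl ≤ p.1))
    let edges' := match stack'.head? with
      | some p => edges ++ [(p.2, feat)]
      | none => edges
    pvRun rest edges' ((lvl, feat) :: stack') root'

theorem pvLoopA_eq_run (lines : List String) : ∀ edges stack root,
    pvLoopA lines edges stack root = pvRun (pvCollect lines) edges stack root := by
  induction lines with
  | nil => intro edges stack root; rfl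
  | cons line rest ih =>
    intro edges stack root
    cases root <;> simp only [pvLoopA, pvCollect] <;> split_ifs <;> simp_all [pvRun]

theorem pvRun_snd_some (items : List (Int × String)) : ∀ edges stack r,
    (pvRun items edges stack (some r)).2 = some r := by
  induction items with
  | nil => intro edges stack r; rfl
  | cons p rest ih => intro edges stack r; simp [pvRun, ih]

theorem pvRun_snd (items : List (Int × String)) (edges : List (String × String))
    (stack : List (Int × String)) :
    (pvRun items edges stack none).2 = items.head?.map (·.2) := by
  cases items with
  | nil => rfl
  | cons p rest => simp [pvRun, pvRun_snd_some]

theorem dropWhile_dropWhile {α : Type} (p p' : α → Bool) (h : ∀ x, p' x = true → p x = true) :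
    ∀ l : List α, (l.dropWhile p').dropWhile p = l.dropWhile p := by
  intro l
  induction l with
  | nil => rfl
  | cons a l ih =>
    by_cases ha : p' a = true
    · simp [ha, h a ha, ih]
    · simp [List.dropWhile_cons, ha]

-- the invariant relating A's stack to B's reversed prefix: they answer every
-- "nearest previous strictly-smaller level" query identically
def pvR (stack prevRev : List (Int × String)) : Prop :=
  ∀ q : Int, (stack.dropWhile (fun p => decide (q ≤ p.1))).head? =
    prevRev.find? (fun p => decide (p.1 < q))

theorem pvR_nil : pvR [] [] := by intro q; rfl

theorem pvR_step (stack prevRev : List (Int × String)) (lvl : Int) (feat : String)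
    (h : pvR stack prevRev) :
    pvR ((lvl, feat) :: stack.dropWhile (fun p => decide (lvl ≤ p.1))) ((lvl, feat) :: prevRev) := by
  intro q
  by_cases hq : q ≤ lvl
  · have hnlt : ¬ (lvl < q) := by omega
    simp only [List.dropWhile_cons, List.find?_cons]
    simp only [show (decide (q ≤ ((lvl, feat) : Int × String).1)) = true by simp [hq],
      show (decide (((lvl, feat) : Int × String).1 < q)) = false by simp; omega]
    have hdd := dropWhile_dropWhile (fun p : Int × String => decide (q ≤ p.1))
      (fun p : Int × String => decide (lvl ≤ p.1))
      (fun x hx => by simp at hx ⊢; omega) stack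
    rw [hdd]; exact h q
  · have hlt : lvl < q := by omega
    simp [hq, hlt]

theorem pvRun_fst (items : List (Int × String)) : ∀ edges stack prevRev root,
    pvR stack prevRev →
    (pvRun items edges stack root).1 = edges ++ pvEdgesB prevRev items := by
  induction items with
  | nil => intro edges stack prevRev root _; simp [pvRun, pvEdgesB]
  | cons p rest ih =>
    intro edges stack prevRev root hR
    obtain ⟨lvl, feat⟩ := p
    simp only [pvRun, pvEdgesB]
    rw [ih _ _ ((lvl, feat) :: prevRev) _ (pvR_step stack prevRev lvl feat hR)]
    rw [← hR lvl]
    cases hh : (stack.dropWhile (fun p => decide (lvl ≤ p.1))).head? <;> simp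

-- ===== VERDICT (by name: the statement is the Claim_ definition above) =====
theorem parse_uvl_features_tree_spec : Claim_equal_parse_uvl_features_tree := by
  intro uvl_text _
  unfold Spec_parse_uvl_features_tree parse_uvl_features_tree parse_uvl_features_tree_alt
  cases h : pvAfterFeatures (PySem.Str.splitlines uvl_text) with
  | none => rfl
  | some rest =>
    simp only [pvLoopA_eq_run]
    refine Prod.ext ?_ ?_
    · rw [pvRun_fst _ _ _ [] _ pvR_nil]; rfl
    · exact pvRun_snd _ _ _
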